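-- pv_equiv track=rewrite | github.com/EnTangledUpInBlue/qShop | rotated_surface_code_coordinates.py | rsurf_qubit_coords
-- ===== SOURCE A (Python) =====
-- from typing import List,Set,Dict,Tuple
--
-- def rsurf_qubit_coords(L:int) -> Set[Tuple[int,int]]:
--
--     if L==1:
--         return set([(0,0)])
--
--     else:
--         Lset = rsurf_qubit_coords(L-1)
--         for coord1 in range(L-2,L):
--             Lset.add((2*coord1,2*coord1))
--
--             for coord2 in range(coord1):
--                 Lset.add((2*coord1,2*coord2))
--                 Lset.add((2*coord2,2*coord1))
--
--         return Lset
-- ===== SOURCE B (Python) =====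
-- def rsurf_qubit_coords(L):
--     coords = []
--     for k in range(L):
--         coords.append((2 * k, 2 * k))
--         for j in range(k):
--             coords.append((2 * k, 2 * j))
--             coords.append((2 * j, 2 * k))
--     return set(coords)
-- ===== Notes on version B (the rewrite author's own statement) =====
-- stated objective: simpler
-- what changed: B replaces A's recursion-on-L with per-level set re-insertion (each level redundantly re-adds the whole previous diagonal layer) by a single flat iterative double loop that appends each grid point exactly once to a list and returns set(list).
-- outside the precondition, e.g. on rsurf_qubit_coords(0): A raises RecursionError, B returns set()
import Mathlib
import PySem

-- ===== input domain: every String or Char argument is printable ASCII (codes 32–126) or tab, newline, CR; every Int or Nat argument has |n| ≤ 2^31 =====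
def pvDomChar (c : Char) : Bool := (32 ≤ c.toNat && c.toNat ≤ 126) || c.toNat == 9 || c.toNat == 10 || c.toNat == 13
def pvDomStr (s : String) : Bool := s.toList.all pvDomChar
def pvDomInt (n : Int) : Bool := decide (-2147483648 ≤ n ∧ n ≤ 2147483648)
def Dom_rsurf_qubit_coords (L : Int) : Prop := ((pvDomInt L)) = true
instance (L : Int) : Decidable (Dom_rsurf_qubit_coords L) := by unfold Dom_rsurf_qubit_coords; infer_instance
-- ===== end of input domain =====

-- B replaces A's recursion-with-redundant-set-reinsertion by one flat double loop that
-- emits each point exactly once (objective: simpler; return value only).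

-- ===== PORT A =====
-- one Python loop level: for coord1 in range(L-2, L): add (2c1,2c1); for coord2 in range(coord1): add (2c1,2c2); add (2c2,2c1)
def pvALayer (s : List (Int × Int)) (c1 : Int) : List (Int × Int) :=
  (PySem.List.pyRange 0 c1 1).foldl
    (fun s c2 => PySem.Set.add (PySem.Set.add s (2*c1, 2*c2)) (2*c2, 2*c1))
    (PySem.Set.add s (2*c1, 2*c1))

-- recursion on L, done on L.toNat; the Python recurses without base case for L ≤ 0 (excluded by Pre_)
def pvAGo : Nat → List (Int × Int)
  | 0 => []
  | 1 => [(0, 0)]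
  | n+2 => (PySem.List.pyRange (n : Int) ((n : Int) + 2) 1).foldl pvALayer (pvAGo (n+1))

def rsurf_qubit_coords (L : Int) : List (Int × Int) := pvAGo L.toNat

-- ===== PORT B =====
-- inner loop: for j in range(k): coords.append((2k,2j)); coords.append((2j,2k))
def pvBInner (k : Int) (coords : List (Int × Int)) : List (Int × Int) :=
  (PySem.List.pyRange 0 k 1).foldl
    (fun c j => c ++ [(2*k, 2*j)] ++ [(2*j, 2*k)]) coords

-- coords = []; for k in range(L): coords.append((2k,2k)); inner loop
def pvBList (L : Int) : List (Int × Int) :=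
  (PySem.List.pyRange 0 L 1).foldl
    (fun c k => pvBInner k (c ++ [(2*k, 2*k)])) []

-- return set(coords)
def rsurf_qubit_coords_alt (L : Int) : List (Int × Int) := PySem.Set.ofList (pvBList L)

-- ===== PRECONDITION & SPEC =====
-- Python A recurses without a base case for L ≤ 0 (RecursionError); excluded here.
def Pre_rsurf_qubit_coords (L : Int) : Prop := 1 ≤ L
instance (L : Int) : Decidable (Pre_rsurf_qubit_coords L) := by unfold Pre_rsurf_qubit_coords; infer_instance
def pvWitness_rsurf_qubit_coords : Int := 3

def Spec_rsurf_qubit_coords (L : Int) (out : List (Int × Int)) : Prop := out = rsurf_qubit_coords_alt L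
instance (L : Int) (out : List (Int × Int)) : Decidable (Spec_rsurf_qubit_coords L out) := by unfold Spec_rsurf_qubit_coords; infer_instance

-- ===== CLAIM (what is proved, stated in full; the proofs are below) =====
def Claim_equal_rsurf_qubit_coords : Prop := ∀ (L : Int), Dom_rsurf_qubit_coords L → Pre_rsurf_qubit_coords L → Spec_rsurf_qubit_coords L (rsurf_qubit_coords L)

-- ===== LEMMAS AND PROOFS =====

-- the diagonal "layer" of points whose larger coordinate is 2k, in emission order
def pvInner (k : Int) : List (Int × Int) :=
  (PySem.List.pyRange 0 k 1).flatMap (fun j => [(2*k, 2*j), (2*j, 2*k)])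

def pvLayer (k : Int) : List (Int × Int) := (2*k, 2*k) :: pvInner k

def pvFull (L : Int) : List (Int × Int) := (PySem.List.pyRange 0 L 1).flatMap pvLayer

theorem pvFull_succ {L : Int} (h : 0 ≤ L) : pvFull (L + 1) = pvFull L ++ pvLayer L := by
  unfold pvFull
  rw [PySem.List.pyRange_one_succ_right h, List.flatMap_append]
  simp

theorem mem_pvLayer_max {k : Int} {x : Int × Int} (hx : x ∈ pvLayer k) :
    max x.1 x.2 = 2 * k := by
  rw [pvLayer, List.mem_cons] at hx
  rcases hx with rfl | h
  · simp
  · simp only [pvInner, List.mem_flatMap, PySem.List.mem_pyRange_one] at h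
    obtain ⟨j, ⟨hj0, hjk⟩, hmem⟩ := h
    simp only [List.mem_cons, List.not_mem_nil, or_false] at hmem
    rcases hmem with rfl | rfl <;> simp <;> omega

theorem mem_pvFull_max {L : Int} {x : Int × Int} (hx : x ∈ pvFull L) :
    max x.1 x.2 ≤ 2 * (L - 1) := by
  simp only [pvFull, List.mem_flatMap, PySem.List.mem_pyRange_one] at hx
  obtain ⟨k, ⟨hk0, hkL⟩, hmem⟩ := hx
  have := mem_pvLayer_max hmem
  omega

theorem nodup_pvInner (k : Int) : (pvInner k).Nodup := by
  unfold pvInner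
  rw [List.nodup_flatMap]
  constructor
  · intro j hj
    simp only [PySem.List.mem_pyRange_one] at hj
    refine List.nodup_cons.mpr ⟨?_, List.nodup_singleton _⟩
    simp only [List.mem_singleton, Prod.mk.injEq]
    omega
  · have hpw := PySem.List.pairwise_lt_pyRange_one 0 k
    refine hpw.imp ?_
    intro a b hab
    simp only [Function.onFun]
    rw [List.disjoint_left]
    intro x hx hx'
    simp only [List.mem_cons, List.not_mem_nil, or_false] at hx hx'
    rcases hx with rfl | rfl <;> rcases hx' with h' | h' <;>
      (simp only [Prod.mk.injEq] at h'; omega)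

theorem nodup_pvLayer (k : Int) : (pvLayer k).Nodup := by
  unfold pvLayer
  rw [List.nodup_cons]
  refine ⟨?_, nodup_pvInner k⟩
  intro hmem
  simp only [pvInner, List.mem_flatMap, PySem.List.mem_pyRange_one] at hmem
  obtain ⟨j, ⟨hj0, hjk⟩, h⟩ := hmem
  simp only [List.mem_cons, List.not_mem_nil, or_false] at h
  rcases h with h | h <;> (simp only [Prod.mk.injEq] at h; omega)

theorem nodup_pvFull (L : Int) : (pvFull L).Nodup := by
  by_cases h : L ≤ 0
  · unfold pvFull; rw [PySem.List.pyRange_one_eq_nil h]; simp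
  · lift L to ℕ using (by omega : (0:Int) ≤ L) with n
    clear h
    induction n with
    | zero => unfold pvFull; simp [PySem.List.pyRange_one_eq_nil]
    | succ m ih =>
      rw [show ((m + 1 : ℕ) : Int) = (m : Int) + 1 by push_cast; ring,
        pvFull_succ (by positivity), List.nodup_append]
      refine ⟨ih, nodup_pvLayer _, fun x hx y hy => ?_⟩
      rintro rfl
      have h1 := mem_pvFull_max hx
      have h2 := mem_pvLayer_max hy
      omega

-- every element of pvLayer L already lies in pvFull (L+1)
theorem pvLayer_subset_full {L : Int} (h : 0 ≤ L) {x : Int × Int}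
    (hx : x ∈ pvLayer L) : x ∈ pvFull (L + 1) := by
  rw [pvFull_succ h]
  exact List.mem_append_right _ hx

-- a double-add fold is a Set.update by the flattened pair list
theorem foldl_double_add {α β : Type} [BEq α] (f g : β → α) (l : List β) (s : List α) :
    l.foldl (fun s j => PySem.Set.add (PySem.Set.add s (f j)) (g j)) s
      = (l.flatMap (fun j => [f j, g j])).foldl PySem.Set.add s := by
  induction l generalizing s with
  | nil => rfl
  | cons a t ih => simp only [List.foldl_cons, List.flatMap_cons, List.foldl_append, List.foldl_cons, List.foldl_nil, ih]

theorem pvALayer_eq_update (s : List (Int × Int)) (c : Int) :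
    pvALayer s c = PySem.Set.update s (pvLayer c) := by
  unfold pvALayer PySem.Set.update pvLayer pvInner
  rw [foldl_double_add]
  rfl

theorem update_of_subset {α : Type} [BEq α] [LawfulBEq α] {s l : List α}
    (h : ∀ x ∈ l, x ∈ s) : PySem.Set.update s l = s := by
  induction l generalizing s with
  | nil => rfl
  | cons a t ih =>
    have ha : PySem.Set.add s a = s := by
      simp only [PySem.Set.add, PySem.Set.contains]
      rw [if_pos]
      simpa using h a List.mem_cons_self
    show PySem.Set.update (PySem.Set.add s a) t = s
    rw [ha]
    exact ih (fun x hx => h x (List.mem_cons_of_mem _ hx))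

theorem update_of_fresh {α : Type} [BEq α] [LawfulBEq α] {s l : List α}
    (hl : l.Nodup) (h : ∀ x ∈ l, x ∉ s) : PySem.Set.update s l = s ++ l := by
  induction l generalizing s with
  | nil => simp [PySem.Set.update]
  | cons a t ih =>
    rw [List.nodup_cons] at hl
    have ha : PySem.Set.add s a = s ++ [a] := by
      simp only [PySem.Set.add, PySem.Set.contains]
      rw [if_neg]
      simpa using h a List.mem_cons_self
    show PySem.Set.update (PySem.Set.add s a) t = s ++ a :: t
    rw [ha, ih hl.2]
    · simp
    · intro x hx
      simp only [List.mem_append, List.mem_singleton]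
      rintro (hxs | rfl)
      · exact h x (List.mem_cons_of_mem _ hx) hxs
      · exact hl.1 hx

-- A computes pvFull
theorem pvAGo_eq_full : ∀ n : Nat, 1 ≤ n → pvAGo n = pvFull (n : Int) := by
  intro n
  induction n with
  | zero => omega
  | succ m ih =>
    intro _
    rcases Nat.eq_zero_or_pos m with rfl | hm
    · show pvAGo 1 = pvFull 1
      unfold pvAGo pvFull pvLayer pvInner
      decide
    · obtain ⟨k, rfl⟩ := Nat.exists_eq_add_of_le hm
      rw [show 1 + k + 1 = k + 2 from by omega]
      unfold pvAGo
      have h1 : (k : Int) < (k : Int) + 2 := by omega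
      have h2 : (k : Int) + 1 < (k : Int) + 2 := by omega
      rw [PySem.List.pyRange_one_cons h1, PySem.List.pyRange_one_cons h2,
        PySem.List.pyRange_one_eq_nil (by omega)]
      simp only [List.foldl]
      rw [show k + 1 = 1 + k from by omega, ih (by omega),
        show ((1 + k : Nat) : Int) = (k : Int) + 1 from by push_cast; ring]
      rw [pvALayer_eq_update, pvALayer_eq_update]
      rw [update_of_subset (s := pvFull ((k : Int) + 1)) (l := pvLayer (k : Int))
        (fun x hx => pvLayer_subset_full (by omega) hx)]
      rw [update_of_fresh (nodup_pvLayer _) ?_]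
      · rw [← pvFull_succ (by omega)]
        congr 1
      · intro x hx hx'
        have := mem_pvLayer_max hx
        have := mem_pvFull_max hx'
        omega

-- a fold that only appends is an append of a flatMap
theorem foldl_double_append {α β : Type} (f g : β → α) (l : List β) (c : List α) :
    l.foldl (fun c j => c ++ [f j] ++ [g j]) c = c ++ l.flatMap (fun j => [f j, g j]) := by
  induction l generalizing c with
  | nil => simp
  | cons a t ih =>
    simp only [List.foldl_cons, List.flatMap_cons, ih]
    simp [List.flatMap_def]

theorem pvBInner_eq (k : Int) (c : List (Int × Int)) :
    pvBInner k c = c ++ pvInner k := by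
  unfold pvBInner pvInner
  rw [foldl_double_append]

-- B's loop appends exactly the layers, in order
theorem pvBList_loop (l : List Int) (c : List (Int × Int)) :
    l.foldl (fun c k => pvBInner k (c ++ [(2*k, 2*k)])) c = c ++ l.flatMap pvLayer := by
  induction l generalizing c with
  | nil => simp
  | cons a t ih =>
    simp only [List.foldl_cons]
    rw [pvBInner_eq, ih]
    simp [pvLayer, List.flatMap_def]

theorem pvBList_eq_full (L : Int) : pvBList L = pvFull L := by
  unfold pvBList pvFull
  rw [pvBList_loop]
  simp

theorem rsurf_equal {L : Int} (h : 1 ≤ L) :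
    rsurf_qubit_coords L = rsurf_qubit_coords_alt L := by
  unfold rsurf_qubit_coords rsurf_qubit_coords_alt
  rw [pvBList_eq_full L, PySem.Set.ofList_eq_self_of_nodup _ (nodup_pvFull L)]
  have hL : ((L.toNat : Nat) : Int) = L := Int.toNat_of_nonneg (by omega)
  rw [pvAGo_eq_full L.toNat (by omega), hL]

-- ===== VERDICT (by name: the statement is the Claim_ definition above) =====
theorem rsurf_qubit_coords_spec : Claim_equal_rsurf_qubit_coords := by
  intro L _ hpre
  unfold Spec_rsurf_qubit_coords
  exact rsurf_equal hpre
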